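-- pv_equiv track=rewrite | github.com/pypi-data/pypi-mirror-403 | packages/dokken/dokken-0.1.1-py3-none-any.whl/src/output/merger.py | _reconstruct_document
-- ===== SOURCE A (Python) =====
-- def _save_section(
--     sections: dict[str, str | list[str]], section_name: str, content: list[str]
-- ) -> None:
--     """Save a section's content to the sections dictionary."""
--     sections[section_name] = "\n".join(content)
--
-- def _add_to_preamble(sections: dict[str, str | list[str]], line: str) -> None:
--     """Add a line to the preamble section."""
--     if "_preamble" not in sections:
--         sections["_preamble"] = []
--     preamble = sections["_preamble"]
--     if isinstance(preamble, list):
--         preamble.append(line)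
--
-- def parse_sections(markdown: str) -> dict[str, str]:
--     """
--     Parse a markdown document into sections keyed by header.
--
--     Args:
--         markdown: The markdown document to parse.
--
--     Returns:
--         Dictionary mapping section headers to their content (including header).
--     """
--     sections: dict[str, str | list[str]] = {}
--     current_section = None
--     current_content = []
--
--     for line in markdown.split("\n"):
--         if line.startswith("## "):
--             # Save previous section before starting new one
--             if current_section is not None:
--                 _save_section(sections, current_section, current_content)
--
--             # Start new section
--             current_section = line[3:].strip()
--             current_content = [line]
--         elif current_section is not None:
--             # Add to current section
--             current_content.append(line)
--         else:
--             # Add to preamble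
--             _add_to_preamble(sections, line)
--
--     # Save last section
--     if current_section is not None:
--         _save_section(sections, current_section, current_content)
--
--     # Type checker knows all values are now str after finalization
--     return _flatten_values(sections)
--
-- def _flatten_values(sections: dict[str, str | list[str]]) -> dict[str, str]:
--     # Finalize preamble and other values - convert list to string
--     new_sections: dict[str, str] = {}
--     for key, value in sections.items():
--         if isinstance(value, list):
--             new_sections[key] = "\n".join(value)
--         else:
--             new_sections[key] = value
--     return new_sections
--
-- def _reconstruct_document(sections: dict[str, str], original_doc: str) -> str:
--     """Reconstruct document maintaining original section order."""
--     result_parts = []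
--
--     # Start with preamble
--     if "_preamble" in sections:
--         result_parts.append(sections["_preamble"].rstrip())
--
--     # Get original section order
--     original_sections = parse_sections(original_doc)
--     original_order = [k for k in original_sections if k != "_preamble"]
--
--     # Add original sections (skipping removed ones)
--     added_sections = set()
--     for section_header in original_order:
--         if section_header in sections:
--             result_parts.append(sections[section_header].rstrip())
--             added_sections.add(section_header)
--
--     # Add new sections at the end
--     for section_header, content in sections.items():
--         if section_header != "_preamble" and section_header not in added_sections:
--             result_parts.append(content.rstrip())
--
--     return "\n\n".join(result_parts) + "\n"
-- ===== SOURCE B (Python) =====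
-- def _save_section(sections, section_name, content):
--     sections[section_name] = "\n".join(content)
--
-- def _add_to_preamble(sections, line):
--     if "_preamble" not in sections:
--         sections["_preamble"] = []
--     preamble = sections["_preamble"]
--     if isinstance(preamble, list):
--         preamble.append(line)
--
-- def parse_sections(markdown):
--     sections = {}
--     current_section = None
--     current_content = []
--     for line in markdown.split("\n"):
--         if line.startswith("## "):
--             if current_section is not None:
--                 _save_section(sections, current_section, current_content)
--             current_section = line[3:].strip()
--             current_content = [line]
--         elif current_section is not None:
--             current_content.append(line)
--         else:
--             _add_to_preamble(sections, line)
--     if current_section is not None: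
--         _save_section(sections, current_section, current_content)
--     return _flatten_values(sections)
--
-- def _flatten_values(sections):
--     new_sections = {}
--     for key, value in sections.items():
--         if isinstance(value, list):
--             new_sections[key] = "\n".join(value)
--         else:
--             new_sections[key] = value
--     return new_sections
--
-- def _reconstruct_document(sections, original_doc):
--     """Reconstruct the document by ranking every header and stable-sorting the keys."""
--     original = parse_sections(original_doc)
--     # desired total order: original headers first, then new headers in dict order
--     order = [k for k in original if k != "_preamble"]
--     for k in sections:
--         if k != "_preamble" and k not in original:
--             order.append(k)
--     rank = {}
--     for k in order:
--         rank[k] = len(rank)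
--     keys = sorted((k for k in sections if k != "_preamble"), key=lambda k: rank[k])
--     if "_preamble" in sections:
--         keys.insert(0, "_preamble")
--     return "\n\n".join(sections[k].rstrip() for k in keys) + "\n"
-- ===== Notes on version B (the rewrite author's own statement) =====
-- stated objective: alternative
-- what changed: Instead of A's two ordering passes (scan the original section order appending matches while tracking an 'added' set, then rescan the dict for leftovers), B assigns every header a numeric rank (original headers first, new headers after, in dict order) and stably sorts the section keys by that rank, then joins the rstripped contents in one pass.
import Mathlib
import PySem

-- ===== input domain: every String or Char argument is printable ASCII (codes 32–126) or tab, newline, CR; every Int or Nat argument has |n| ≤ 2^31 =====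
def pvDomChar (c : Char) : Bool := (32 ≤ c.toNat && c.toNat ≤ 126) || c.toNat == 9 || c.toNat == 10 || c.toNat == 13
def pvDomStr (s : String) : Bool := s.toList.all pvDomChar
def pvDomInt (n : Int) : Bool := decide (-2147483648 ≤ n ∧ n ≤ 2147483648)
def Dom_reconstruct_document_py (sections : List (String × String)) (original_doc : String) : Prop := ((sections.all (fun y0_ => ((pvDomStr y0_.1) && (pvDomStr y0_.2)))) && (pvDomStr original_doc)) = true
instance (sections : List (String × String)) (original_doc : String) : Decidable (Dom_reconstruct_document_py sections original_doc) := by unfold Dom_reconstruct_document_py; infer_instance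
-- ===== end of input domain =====

-- B replaces A's two ordering passes (scan original order with an `added` set, then rescan the dict)
-- by ranking every header once and stably sorting the section keys by rank; objective: alternative.

-- ===== PORT A =====
-- shared helper: port of parse_sections (called by both Pythons). Section contents are kept as
-- line lists and joined in the final _flatten_values fold — equal to Python's values, which are
-- themselves "\n".join(content) at save time. markdown.split("\n") = Str.split? with the literal
-- separator "\n" ≠ "", so the Option is always some and the getD default is never taken.
def pvParseStep (st : PySem.Dict String (List String) × Option String × List String) (line : String) :
    PySem.Dict String (List String) × Option String × List String :=
  if PySem.Str.startswith line "## " then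
    (match st.2.1 with
      | some s => st.1.insert s st.2.2
      | none => st.1,
     some (PySem.Str.strip (PySem.Str.slice line (some 3) none)),
     [line])
  else
    match st.2.1 with
    | some _ => (st.1, st.2.1, st.2.2 ++ [line])
    | none => (st.1.modify "_preamble" [] (fun l => l ++ [line]), st.2.1, st.2.2)

def parseSectionsPy (markdown : String) : PySem.Dict String String :=
  let st := ((PySem.Str.split? markdown "\n").getD []).foldl pvParseStep (PySem.Dict.empty, none, [])
  let d := match st.2.1 with
    | some s => st.1.insert s st.2.2
    | none => st.1
  d.items.foldl (fun nd p => nd.insert p.1 (PySem.Str.join "\n" p.2)) PySem.Dict.empty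

def reconstruct_document_py (sections : List (String × String)) (original_doc : String) : String :=
  let d := PySem.Dict.ofList sections
  let parts0 : List String :=
    if d.contains "_preamble" then [PySem.Str.rstrip (d.getD "_preamble" "")] else []
  let original_order := (parseSectionsPy original_doc).keys.filter (fun k => decide (k ≠ "_preamble"))
  let st := original_order.foldl
      (fun (s : List String × PySem.Set String) h =>
        if d.contains h = true then (s.1 ++ [PySem.Str.rstrip (d.getD h "")], PySem.Set.add s.2 h) else s)
      (parts0, PySem.Set.empty)
  let parts := d.items.foldl
      (fun acc p => if p.1 ≠ "_preamble" ∧ p.1 ∉ st.2 then acc ++ [PySem.Str.rstrip p.2] else acc) st.1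
  PySem.Str.join "\n\n" parts ++ "\n"

-- ===== PORT B =====
-- rank[k] never misses (every non-preamble section key got a rank), so rank[k] is ported as getD _ 0.
def reconstruct_document_py_alt (sections : List (String × String)) (original_doc : String) : String :=
  let d := PySem.Dict.ofList sections
  let orig := parseSectionsPy original_doc
  let order := d.keys.foldl
      (fun acc k => if k ≠ "_preamble" ∧ orig.contains k = false then acc ++ [k] else acc)
      (orig.keys.filter (fun k => decide (k ≠ "_preamble")))
  let rank := order.foldl (fun r k => r.insert k (PySem.Dict.size r : Int)) PySem.Dict.empty
  let keys := PySem.List.sorted (d.keys.filter (fun k => decide (k ≠ "_preamble")))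
      (fun k => rank.getD k 0)
  let keys2 := if d.contains "_preamble" then "_preamble" :: keys else keys
  PySem.Str.join "\n\n" (keys2.map (fun k => PySem.Str.rstrip (d.getD k ""))) ++ "\n"

-- ===== PRECONDITION & SPEC =====
def Spec_reconstruct_document_py (sections : List (String × String)) (original_doc : String) (out : String) : Prop := out = reconstruct_document_py_alt sections original_doc
instance (sections : List (String × String)) (original_doc : String) (out : String) : Decidable (Spec_reconstruct_document_py sections original_doc out) := by unfold Spec_reconstruct_document_py; infer_instance

-- ===== CLAIM (what is proved, stated in full; the proofs are below) =====
def Claim_equal_reconstruct_document_py : Prop := ∀ (sections : List (String × String)) (original_doc : String), Dom_reconstruct_document_py sections original_doc → Spec_reconstruct_document_py sections original_doc (reconstruct_document_py sections original_doc)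

-- ===== LEMMAS AND PROOFS =====

theorem parse_keys_nodup (m : String) : (parseSectionsPy m).keys.Nodup := by
  unfold parseSectionsPy
  exact PySem.Dict.nodup_keys_foldl_insert_key _ (fun (p : String × List String) => p.1)
    (fun _ (p : String × List String) => PySem.Str.join "\n" p.2) _ (by simp [PySem.Dict.keys_empty])

def pvRank (l : List String) : PySem.Dict String Int :=
  List.foldl (fun r k => r.insert k (PySem.Dict.size r : Int)) PySem.Dict.empty l

theorem pvRank_keys (l : List String) (h : l.Nodup) : (pvRank l).keys = l := by
  unfold pvRank
  rw [PySem.Dict.keys_foldl_insert, PySem.Dict.keys_empty, PySem.Set.update_nil_left,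
    PySem.Set.ofList_eq_self_of_nodup _ h]

theorem pvRank_size (l : List String) (h : l.Nodup) : (pvRank l).size = l.length := by
  have hk := pvRank_keys l h
  have : (pvRank l).keys.length = l.length := by rw [hk]
  simpa [PySem.Dict.keys, PySem.Dict.size] using this

theorem pvRank_getD (l : List String) (h : l.Nodup) (i : Nat) (hi : i < l.length) :
    (pvRank l).getD l[i] 0 = (i : Int) := by
  induction l using List.reverseRecOn generalizing i with
  | nil => simp at hi
  | append_singleton l k ih =>
    have hnd : l.Nodup := (List.nodup_append.mp h).1
    have hk : k ∉ l := by
      intro hmem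
      have hd := (List.nodup_append.mp h).2.2
      exact hd k hmem k (by simp) rfl
    have hfold : pvRank (l ++ [k]) = (pvRank l).insert k ((pvRank l).size : Int) := by
      unfold pvRank
      rw [List.foldl_append]
      rfl
    rcases Nat.lt_or_ge i l.length with hlt | hge
    · have hne : l[i] ≠ k := fun he => hk (he ▸ List.getElem_mem hlt)
      rw [List.getElem_append_left hlt, hfold,
        PySem.Dict.getD_insert_of_ne _ _ _ hne, ih hnd i hlt]
    · have hie : i = l.length :=
        Nat.le_antisymm (Nat.le_of_lt_succ (by simpa using hi)) hge
      subst hie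
      rw [List.getElem_concat_length, hfold, PySem.Dict.getD_insert_self,
        pvRank_size l hnd]
      all_goals rfl

theorem pvRank_pairwise (l : List String) (h : l.Nodup) :
    l.Pairwise (fun a b => (pvRank l).getD a 0 < (pvRank l).getD b 0) := by
  rw [List.pairwise_iff_getElem]
  intro i j hi hj hij
  rw [pvRank_getD l h i hi, pvRank_getD l h j hj]
  exact_mod_cast hij

theorem main_eq (sections : List (String × String)) (original_doc : String) :
    reconstruct_document_py sections original_doc
      = reconstruct_document_py_alt sections original_doc := by
  simp only [reconstruct_document_py, reconstruct_document_py_alt]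
  set d := PySem.Dict.ofList sections with hd
  set O := parseSectionsPy original_doc with hOdef
  have hK : d.keys.Nodup := by rw [hd]; exact PySem.Dict.nodup_keys_ofList sections
  have hO : O.keys.Nodup := by rw [hOdef]; exact parse_keys_nodup original_doc
  set ord := List.filter (fun k => decide (k ≠ "_preamble")) O.keys with hord
  set xs := List.filter (fun k => decide (k ≠ "_preamble")) d.keys with hxs
  set pre0 := (if d.contains "_preamble" = true then [PySem.Str.rstrip (d.getD "_preamble" "")] else []) with hpre0
  set ordC := List.filter (fun x => decide (d.contains x = true)) ord with hordC
  set added := PySem.Set.ofList ordC with hadded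
  set nw := List.filter (fun k => decide (k ≠ "_preamble" ∧ O.contains k = false)) d.keys with hnw
  have hconF : ∀ k, (O.contains k = false) ↔ k ∉ O.keys := by
    intro k
    rw [← PySem.Dict.contains_iff_mem_keys]
    cases O.contains k <;> simp
  -- split A's paired fold into two independent folds
  set fA := fun (a : List String) (h : String) =>
    if d.contains h = true then a ++ [PySem.Str.rstrip (d.getD h "")] else a with hfA
  set gA := fun (t : PySem.Set String) (h : String) =>
    if d.contains h = true then PySem.Set.add t h else t with hgA
  have hsplit : (fun (s : List String × PySem.Set String) h =>
        if d.contains h = true then (s.1 ++ [PySem.Str.rstrip (d.getD h "")], PySem.Set.add s.2 h) else s)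
      = fun (s : List String × PySem.Set String) h => (fA s.1 h, gA s.2 h) := by
    funext s h
    rw [hfA, hgA]
    by_cases hc : d.contains h = true <;> simp [hc]
  rw [hsplit, PySem.List.foldl_prod_mk fA gA]
  dsimp only
  have h1 : List.foldl fA pre0 ord
      = pre0 ++ List.map (fun h => PySem.Str.rstrip (d.getD h "")) ordC := by
    rw [hfA, PySem.List.foldl_append_ite (p := fun h => d.contains h = true)
      (f := fun h => PySem.Str.rstrip (d.getD h "")), hordC]
  have h2 : List.foldl gA PySem.Set.empty ord = added := by
    rw [hgA, PySem.List.foldl_ite_eq_foldl_filter (p := fun h => d.contains h = true)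
      (f := PySem.Set.add),
      show (PySem.Set.empty : PySem.Set String) = [] from rfl,
      ← PySem.Set.ofList_eq_foldl, hadded, hordC]
  rw [h1, h2]
  -- A's last loop: a plain append-filter over the items
  rw [PySem.List.foldl_append_ite (p := fun (q : String × String) => q.1 ≠ "_preamble" ∧ q.1 ∉ added)
    (f := fun (q : String × String) => PySem.Str.rstrip q.2)]
  rw [PySem.Dict.items_eq_map_keys d hK "", List.filter_map, List.map_map]
  have hfiltA : List.filter
        ((fun (q : String × String) => decide (q.1 ≠ "_preamble" ∧ q.1 ∉ added)) ∘ fun k => (k, d.getD k ""))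
        d.keys = nw := by
    rw [hnw]
    apply List.filter_congr
    intro k hk
    have hck : d.contains k = true := (PySem.Dict.contains_iff_mem_keys d k).mpr hk
    simp only [Function.comp_apply, decide_eq_decide]
    constructor
    · rintro ⟨hne, hnm⟩
      refine ⟨hne, (hconF k).mpr ?_⟩
      intro hmem
      exact hnm (by
        rw [hadded]
        rw [PySem.Set.mem_ofList, hordC, List.mem_filter, hord, List.mem_filter]
        exact ⟨⟨hmem, by simpa using hne⟩, by simpa using hck⟩)
    · rintro ⟨hne, hcf⟩
      refine ⟨hne, ?_⟩
      intro hmem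
      rw [hadded, PySem.Set.mem_ofList, hordC, List.mem_filter, hord, List.mem_filter] at hmem
      exact (hconF k).mp hcf hmem.1.1
  rw [hfiltA]
  -- B's order loop builds ord ++ nw
  rw [PySem.List.foldl_append_ite_eq_filter
    (p := fun k => k ≠ "_preamble" ∧ O.contains k = false), ← hnw]
  set order := ord ++ nw with horder
  -- nodup facts
  have hordN : ord.Nodup := by rw [hord]; exact hO.filter _
  have hnwN : nw.Nodup := by rw [hnw]; exact hK.filter _
  have hmem_ord : ∀ a, a ∈ ord ↔ a ∈ O.keys ∧ a ≠ "_preamble" := by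
    intro a; rw [hord, List.mem_filter]; simp
  have hmem_nw : ∀ a, a ∈ nw ↔ a ∈ d.keys ∧ a ≠ "_preamble" ∧ O.contains a = false := by
    intro a; rw [hnw, List.mem_filter]; simp
  have hmem_ordC : ∀ a, a ∈ ordC ↔ (a ∈ O.keys ∧ a ≠ "_preamble") ∧ a ∈ d.keys := by
    intro a
    rw [hordC, List.mem_filter, ← hmem_ord]
    simp [PySem.Dict.contains_iff_mem_keys]
  have hmem_xs : ∀ a, a ∈ xs ↔ a ∈ d.keys ∧ a ≠ "_preamble" := by
    intro a; rw [hxs, List.mem_filter]; simp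
  have horderN : order.Nodup := by
    rw [horder, List.nodup_append]
    refine ⟨hordN, hnwN, ?_⟩
    intro a ha b hbm
    rw [hmem_ord] at ha
    rw [hmem_nw] at hbm
    intro heq
    subst heq
    exact (hconF a).mp hbm.2.2 ha.1
  -- the sort: its key is pvRank order, strictly increasing along order
  rw [show (List.foldl (fun r k => r.insert k ((PySem.Dict.size r : Int))) PySem.Dict.empty order)
      = pvRank order from rfl]
  have hsorted : PySem.List.sorted xs (fun k => (pvRank order).getD k 0) = ordC ++ nw := by
    apply PySem.List.sorted_eq_of_perm_of_pairwise_lt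
    · rw [List.perm_ext_iff_of_nodup (by
        rw [List.nodup_append]
        refine ⟨by rw [hordC]; exact hordN.filter _, hnwN, ?_⟩
        intro a ha b hbm
        rw [hmem_ordC] at ha
        rw [hmem_nw] at hbm
        intro heq
        subst heq
        exact (hconF a).mp hbm.2.2 ha.1.1) (by rw [hxs]; exact hK.filter _)]
      intro a
      rw [List.mem_append, hmem_ordC, hmem_nw, hmem_xs]
      constructor
      · rintro (⟨⟨_, hne⟩, hkd⟩ | ⟨hkd, hne, _⟩) <;> exact ⟨hkd, hne⟩
      · rintro ⟨hkd, hne⟩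
        by_cases hmO : a ∈ O.keys
        · exact Or.inl ⟨⟨hmO, hne⟩, hkd⟩
        · exact Or.inr ⟨hkd, hne, (hconF a).mpr hmO⟩
    · have hsub : (ordC ++ nw).Sublist order := by
        rw [horder]
        exact List.Sublist.append (by rw [hordC]; exact List.filter_sublist) (List.Sublist.refl nw)
      exact (pvRank_pairwise order horderN).sublist hsub
  rw [hsorted]
  -- assemble both sides
  by_cases hp : d.contains "_preamble" = true <;>
    simp [hpre0, hp, Function.comp_def, List.map_append]

-- ===== VERDICT (by name: the statement is the Claim_ definition above) =====
theorem reconstruct_document_py_spec : Claim_equal_reconstruct_document_py := by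
  intro sections original_doc _
  unfold Spec_reconstruct_document_py
  exact main_eq sections original_doc
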